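-- pv_equiv track=rewrite | github.com/nazarevaa/ais4 | dfs.py | dfs_path_length
-- ===== SOURCE A (Python) =====
-- def dfs_path_length(graph, start, end, visited=None, depth=0):
--     # Инициализируем список посещённых вершин
--     if visited is None:
--         visited = []
--     visited.append(start)
--
--     # Если мы достигли конечной вершины, возвращаем текущую длину пути
--     if start == end:
--         return depth
--
--     # Проходим по соседям текущей вершины
--     for neighbor in graph.get(start, []):
--         if neighbor not in visited:
--             # Рекурсивно вызываем dfs для соседа
--             path_length = dfs_path_length(graph, neighbor, end, visited, depth + 1)
--             if path_length is not None:
--                 return path_length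
--     # Если путь не найден, возвращаем None
--     return None
-- ===== SOURCE B (Python) =====
-- def dfs_path_length(graph, start, end, visited=None, depth=0):
--     if visited is None:
--         visited = []
--     visited.append(start)
--     if start == end:
--         return depth
--     # explicit LIFO stack instead of recursion; mark-on-pop with a re-check
--     stack = [(n, depth + 1) for n in reversed(graph.get(start, []))]
--     while stack:
--         node, d = stack.pop()
--         if node in visited:
--             continue
--         visited.append(node)
--         if node == end:
--             return d
--         for n in reversed(graph.get(node, [])):
--             stack.append((n, d + 1))
--     return None
-- ===== Notes on version B (the rewrite author's own statement) =====
-- stated objective: alternative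
-- what changed: Replaces A's recursive DFS (mutual recursion over the neighbour list with early return) by an iterative DFS with an explicit LIFO stack of (node, depth) frames, mark-on-pop with a visited re-check, and reversed pushes so the first neighbour is explored first.
import Mathlib
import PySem

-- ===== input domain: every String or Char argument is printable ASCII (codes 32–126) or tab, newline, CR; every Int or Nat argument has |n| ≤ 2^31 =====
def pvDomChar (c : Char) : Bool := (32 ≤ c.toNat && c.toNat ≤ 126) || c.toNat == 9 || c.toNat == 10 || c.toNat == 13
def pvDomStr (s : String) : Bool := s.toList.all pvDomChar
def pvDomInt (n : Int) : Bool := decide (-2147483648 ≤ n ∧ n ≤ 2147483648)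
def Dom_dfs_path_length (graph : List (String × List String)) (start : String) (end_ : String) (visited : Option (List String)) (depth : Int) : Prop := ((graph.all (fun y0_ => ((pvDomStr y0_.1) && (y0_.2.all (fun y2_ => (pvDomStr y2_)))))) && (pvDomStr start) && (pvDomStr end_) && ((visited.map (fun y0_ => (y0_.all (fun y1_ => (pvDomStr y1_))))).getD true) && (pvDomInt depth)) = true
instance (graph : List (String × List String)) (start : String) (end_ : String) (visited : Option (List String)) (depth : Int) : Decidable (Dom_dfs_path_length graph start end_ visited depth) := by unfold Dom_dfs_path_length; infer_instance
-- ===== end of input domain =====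

-- B replaces A's recursion by an explicit LIFO stack (iterative DFS, mark-on-pop); return value
-- AND the in-place growth of the caller's `visited` list are identical, only the control shape differs.
-- Both ports carry a fuel counter solely as a totality guard (a depth bound on A's recursion,
-- carried per stack frame in B); it never changes the computed value.

-- ===== PORT A =====
-- Python's graph.get(k, []) on the association list (first match)
def pvNbrsA (graph : List (String × List String)) (k : String) : List String :=
  ((graph.find? (fun p => p.1 == k)).map Prod.snd).getD []

-- fuel: one more than the total number of neighbour entries (a bound on A's recursion depth)
def pvFuelA (graph : List (String × List String)) : Nat :=
  (graph.map (fun p => p.2.length)).sum + 1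

inductive DfsResA where
  | found : Int → DfsResA
  | exhausted : DfsResA
  | notfound : List String → DfsResA
deriving Repr, DecidableEq

mutual
-- transliteration of A: append node, test end, then the for-loop over neighbours with early return
def dfsA (graph : List (String × List String)) (end_ : String) (fuel : Nat) (node : String) (visited : List String) (depth : Int) : DfsResA :=
  let visited := visited ++ [node]
  if node = end_ then .found depth
  else loopA graph end_ fuel (pvNbrsA graph node) visited (depth + 1)
termination_by (fuel, 1, 0)

-- the for-loop: `for neighbor in graph.get(start, []): …`
def loopA (graph : List (String × List String)) (end_ : String) (fuel : Nat) (ns : List String) (visited : List String) (d : Int) : DfsResA :=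
  match ns with
  | [] => .notfound visited
  | nb :: rest =>
    if nb ∈ visited then loopA graph end_ fuel rest visited d
    else
      match fuel with
      | 0 => .exhausted
      | f + 1 =>
        match dfsA graph end_ f nb visited d with
        | .found x => .found x
        | .exhausted => .exhausted
        | .notfound v' => loopA graph end_ (f + 1) rest v' d
termination_by (fuel, 0, ns.length)
end

def dfs_path_length (graph : List (String × List String)) (start : String) (end_ : String) (visited : Option (List String)) (depth : Int) : Option Int :=
  match dfsA graph end_ (pvFuelA graph) start (visited.getD []) depth with
  | .found x => some x
  | _ => none

-- ===== PORT B =====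
-- Python's graph.get(k, []) on the association list (first match)
def pvNbrsB (graph : List (String × List String)) (k : String) : List String :=
  ((graph.find? (fun p => p.1 == k)).map Prod.snd).getD []

-- per-frame fuel seed (totality guard only): one more than the total number of neighbour entries
def pvFuelB (graph : List (String × List String)) : Nat :=
  (graph.map (fun p => p.2.length)).sum + 1

inductive DfsResB where
  | found : Int → DfsResB
  | exhausted : DfsResB
  | notfound : List String → DfsResB
deriving Repr, DecidableEq

-- bound on any neighbour-list length, and a frame weight, used only for loopB's termination
def pvDeg (graph : List (String × List String)) : Nat :=
  graph.foldr (fun p a => max p.2.length a) 0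

theorem pvNbrsB_len_le (graph : List (String × List String)) (k : String) :
    (pvNbrsB graph k).length ≤ pvDeg graph := by
  induction graph with
  | nil => simp [pvNbrsB, pvDeg]
  | cons p gs ih =>
    by_cases h : p.1 == k
    · simp [pvNbrsB, pvDeg, List.find?, h]
    · simp only [pvNbrsB, List.find?, h, pvDeg, List.foldr] at *
      omega

def pvWt (D : Nat) (fr : String × Int × Nat) : Nat := (D + 1) ^ fr.2.2

-- transliteration of B's while-loop: pop (node, d); skip if visited; mark; test end; push children
def loopB (graph : List (String × List String)) (end_ : String) (stack : List (String × Int × Nat)) (visited : List String) : DfsResB :=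
  match stack with
  | [] => .notfound visited
  | (node, d, fuel) :: rest =>
    if node ∈ visited then loopB graph end_ rest visited
    else
      match fuel with
      | 0 => .exhausted
      | f + 1 =>
        let visited := visited ++ [node]
        if node = end_ then .found d
        else loopB graph end_ ((pvNbrsB graph node).map (fun n => (n, d + 1, f)) ++ rest) visited
termination_by (stack.map (pvWt (pvDeg graph))).sum
decreasing_by
  · simp [pvWt]
  · simp only [List.map_append, List.sum_append, List.map_cons, List.sum_cons]
    have h1 : (pvNbrsB graph node).length ≤ pvDeg graph := pvNbrsB_len_le graph node
    have h2 : 0 < (pvDeg graph + 1) ^ f := pow_pos (by omega) f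
    have h3 : ∀ xs : List String,
        ((xs.map (fun n => (n, d + 1, f))).map (pvWt (pvDeg graph))).sum
        = xs.length * (pvDeg graph + 1) ^ f := by
      intro xs
      induction xs with
      | nil => simp
      | cons a l ih =>
        simp only [List.map_cons, List.sum_cons, List.length_cons]
        rw [ih]
        simp only [pvWt]
        ring
    rw [h3]
    simp only [pvWt, pow_succ]
    nlinarith

def dfs_path_length_alt (graph : List (String × List String)) (start : String) (end_ : String) (visited : Option (List String)) (depth : Int) : Option Int :=
  let v := visited.getD [] ++ [start]
  if start = end_ then some depth
  else
    match loopB graph end_ ((pvNbrsB graph start).map (fun n => (n, depth + 1, pvFuelB graph))) v with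
    | .found x => some x
    | _ => none

-- ===== PRECONDITION & SPEC =====
def Spec_dfs_path_length (graph : List (String × List String)) (start : String) (end_ : String) (visited : Option (List String)) (depth : Int) (out : Option Int) : Prop := out = dfs_path_length_alt graph start end_ visited depth
instance (graph : List (String × List String)) (start : String) (end_ : String) (visited : Option (List String)) (depth : Int) (out : Option Int) : Decidable (Spec_dfs_path_length graph start end_ visited depth out) := by unfold Spec_dfs_path_length; infer_instance

-- ===== CLAIM (what is proved, stated in full; the proofs are below) =====
def Claim_equal_dfs_path_length : Prop := ∀ (graph : List (String × List String)) (start : String) (end_ : String) (visited : Option (List String)) (depth : Int), Dom_dfs_path_length graph start end_ visited depth → Spec_dfs_path_length graph start end_ visited depth (dfs_path_length graph start end_ visited depth)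

-- ===== LEMMAS AND PROOFS =====

-- the two lookup primitives coincide
theorem pvNbrs_eq (graph : List (String × List String)) (k : String) :
    pvNbrsB graph k = pvNbrsA graph k := rfl

-- stack correspondence: running B's loop on the frames of A's pending neighbour list (all at the
-- same per-frame fuel) is exactly A's loop, then B's loop on the remaining frames
theorem loopB_eq_loopA (graph : List (String × List String)) (end_ : String) :
    ∀ (fuel : Nat) (ns : List String) (rest : List (String × Int × Nat)) (v : List String) (d : Int),
    loopB graph end_ (ns.map (fun n => (n, d, fuel)) ++ rest) v =
      match loopA graph end_ fuel ns v d with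
      | .found x => .found x
      | .exhausted => .exhausted
      | .notfound v' => loopB graph end_ rest v' := by
  intro fuel
  induction fuel using Nat.strong_induction_on with
  | _ fuel ihF =>
    intro ns
    induction ns with
    | nil =>
      intro rest v d
      simp [loopA]
    | cons nb rest' ihL =>
      intro rest v d
      cases fuel with
      | zero =>
        by_cases hmem : nb ∈ v
        · rw [List.map_cons, List.cons_append, loopB, loopA]
          simp only [if_pos hmem]
          exact ihL rest v d
        · rw [List.map_cons, List.cons_append, loopB, loopA]
          simp [hmem]
      | succ f =>
        by_cases hmem : nb ∈ v
        · rw [List.map_cons, List.cons_append, loopB, loopA]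
          simp only [if_pos hmem]
          exact ihL rest v d
        · by_cases hend : nb = end_
          · subst hend
            rw [List.map_cons, List.cons_append, loopB, loopA, dfsA]
            simp [hmem]
          · rw [List.map_cons, List.cons_append, loopB, loopA, dfsA]
            simp only [if_neg hmem, if_neg hend, pvNbrs_eq]
            rw [ihF f (Nat.lt_succ_self f) (pvNbrsA graph nb)
                (rest'.map (fun n => (n, d, f + 1)) ++ rest) (v ++ [nb]) (d + 1)]
            cases h : loopA graph end_ f (pvNbrsA graph nb) (v ++ [nb]) (d + 1) with
            | found x => simp
            | exhausted => simp
            | notfound v' => simpa using ihL rest v' d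

theorem entry_eq (graph : List (String × List String)) (start end_ : String)
    (visited : Option (List String)) (depth : Int) :
    dfs_path_length graph start end_ visited depth = dfs_path_length_alt graph start end_ visited depth := by
  unfold dfs_path_length dfs_path_length_alt
  rw [dfsA]
  by_cases h : start = end_
  · simp [h]
  · simp only [if_neg h, pvNbrs_eq]
    have hfuel : pvFuelB graph = pvFuelA graph := rfl
    rw [hfuel]
    have key := loopB_eq_loopA graph end_ (pvFuelA graph) (pvNbrsA graph start) []
      (visited.getD [] ++ [start]) (depth + 1)
    rw [List.append_nil] at key
    rw [key]
    cases loopA graph end_ (pvFuelA graph) (pvNbrsA graph start) (visited.getD [] ++ [start]) (depth + 1) with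
    | found x => simp
    | exhausted => simp
    | notfound v' => simp [loopB]

-- ===== VERDICT (by name: the statement is the Claim_ definition above) =====
theorem dfs_path_length_spec : Claim_equal_dfs_path_length := by
  intro graph start end_ visited depth _
  unfold Spec_dfs_path_length
  exact entry_eq graph start end_ visited depth
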